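-- pv_equiv track=rewrite | github.com/skdltn210/Algorithm | 프로그래머스/1/147355. 크기가 작은 부분문자열/크기가 작은 부분문자열.py | solution
-- ===== SOURCE A (Python) =====
-- def solution(t, p):
--     l = len(p)
--     s = list(t)
--     cnt=0
--     for i in range(len(t)-l+1):
--         num = ""
--         for j in range(i,i+l):
--             num+=s[j]
--         if num<=p:
--             cnt+=1
--     return cnt
-- ===== SOURCE B (Python) =====
-- def solution(t, p):
--     # Compare each window to p in place, character by character with early exit,
--     # instead of materializing each substring and comparing whole strings.
--     def window_le(i):
--         for j in range(len(p)):
--             if t[i + j] != p[j]: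
--                 return t[i + j] < p[j]
--         return True
--     return sum(window_le(i) for i in range(len(t) - len(p) + 1))
-- ===== Notes on version B (the rewrite author's own statement) =====
-- stated objective: faster
-- what changed: B drops A's inner substring-building loop: each window is compared to p in place, character by character with early exit at the first mismatch, instead of materializing every length-l substring and comparing whole strings.
import Mathlib
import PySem

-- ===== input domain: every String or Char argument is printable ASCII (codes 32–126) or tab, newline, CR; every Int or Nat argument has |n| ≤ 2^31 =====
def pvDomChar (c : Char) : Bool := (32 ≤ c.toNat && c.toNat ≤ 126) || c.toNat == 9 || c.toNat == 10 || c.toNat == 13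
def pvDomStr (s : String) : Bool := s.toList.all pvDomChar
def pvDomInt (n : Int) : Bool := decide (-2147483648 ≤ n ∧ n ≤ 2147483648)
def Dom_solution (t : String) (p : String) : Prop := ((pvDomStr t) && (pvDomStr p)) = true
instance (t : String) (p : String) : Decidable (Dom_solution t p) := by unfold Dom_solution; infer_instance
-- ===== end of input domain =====

-- B replaces A's inner substring-building loop by an in-place char-by-char window
-- comparison with early exit (no substring materialized); return value proved equal.

-- ===== PORT A =====
-- A's `num += s[j]` is ported on List Char (string concat = list append, exact);
-- `num <= p` is Python's code-point lexicographic order = Lean's ≤ on List Char.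
-- s[j] is ported as pyGetD with an arbitrary default: every index the loops
-- produce is in range (i + l ≤ len t for each i of the outer range), so the
-- default is unreachable.
def solution (t : String) (p : String) : Int :=
  let l : Int := p.toList.length
  let s : List Char := t.toList
  (PySem.List.pyRange 0 ((t.toList.length : Int) - l + 1) 1).foldl
    (fun cnt i =>
      let num : List Char :=
        (PySem.List.pyRange i (i + l) 1).foldl
          (fun num j => num ++ [PySem.List.pyGetD s j default]) []
      if num ≤ p.toList then cnt + 1 else cnt)
    0

-- ===== PORT B =====
-- B's inner `for j in range(len(p)): … return early` as structural recursion on j;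
-- t[i+j] is ported as pyGetD with a default that is never used (index always in range).
def windowLe (t p : List Char) (i : Int) (j : Nat) : Bool :=
  if h : j < p.length then
    let x := PySem.List.pyGetD t (i + (j : Int)) default
    let y := p[j]
    if x ≠ y then decide (x < y) else windowLe t p i (j + 1)
  else true
termination_by p.length - j

-- B's `sum(window_le(i) for i in range(len(t) - len(p) + 1))`
def solution_alt (t : String) (p : String) : Int :=
  let tl : List Char := t.toList
  let pl : List Char := p.toList
  (PySem.List.pyRange 0 ((tl.length : Int) - (pl.length : Int) + 1) 1).foldl
    (fun cnt i => cnt + (if windowLe tl pl i 0 then 1 else 0)) 0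

-- ===== PRECONDITION & SPEC =====
def Spec_solution (t : String) (p : String) (out : Int) : Prop := out = solution_alt t p
instance (t : String) (p : String) (out : Int) : Decidable (Spec_solution t p out) := by unfold Spec_solution; infer_instance

-- ===== CLAIM (what is proved, stated in full; the proofs are below) =====
def Claim_equal_solution : Prop := ∀ (t : String) (p : String), Dom_solution t p → Spec_solution t p (solution t p)

-- ===== LEMMAS AND PROOFS =====

-- the lexicographic order on List Char, case by case
theorem pv_nil_le (ys : List Char) : ([] : List Char) ≤ ys := by
  cases ys with
  | nil => exact le_refl _
  | cons y ys => exact Or.inr (List.Lex.nil)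

theorem pv_cons_le_cons_same (x : Char) (xs ys : List Char) :
    ((x :: xs : List Char) ≤ x :: ys) ↔ xs ≤ ys := by
  show (_ = _ ∨ List.Lex _ _ _) ↔ (_ = _ ∨ List.Lex _ _ _)
  rw [List.lex_cons_iff]
  simp

theorem pv_cons_le_cons_ne (x y : Char) (h : x ≠ y) (xs ys : List Char) :
    ((x :: xs : List Char) ≤ y :: ys) ↔ x < y := by
  constructor
  · rintro (heq | hlex)
    · exact absurd (by injection heq) h
    · cases hlex with
      | cons _ => exact absurd rfl h
      | rel h2 => exact h2
  · intro hxy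
    exact Or.inr (List.Lex.rel hxy)

-- A's inner fold builds exactly the window (s.drop i.toNat).take l
theorem pv_window_eq (s : List Char) (l : Nat) :
    ∀ (i : Int), 0 ≤ i → i.toNat + l ≤ s.length →
    (PySem.List.pyRange i (i + (l : Int)) 1).foldl
        (fun num j => num ++ [PySem.List.pyGetD s j default]) []
    = (s.drop i.toNat).take l := by
  induction l with
  | zero =>
    intro i _ _
    rw [PySem.List.pyRange_one_eq_nil (by omega)]
    simp
  | succ m ih =>
    intro i hi hle
    rw [PySem.List.pyRange_one_cons (by omega), List.foldl_cons]
    have hidx : i.toNat < s.length := by omega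
    have hd : s.drop i.toNat = s[i.toNat] :: s.drop (i.toNat + 1) :=
      List.drop_eq_getElem_cons hidx
    rw [PySem.List.foldl_append_singleton_eq_map, List.nil_append,
        PySem.List.pyGetD_eq_getElem s default hi (by omega)]
    have h2 : (i + 1).toNat = i.toNat + 1 := by omega
    have := ih (i + 1) (by omega) (by omega)
    rw [PySem.List.foldl_append_singleton_eq_map, List.nil_append, h2] at this
    have h1' : i + (((m + 1 : Nat)) : Int) = (i + 1) + (m : Int) := by push_cast; ring
    rw [h1', this, hd, List.take_succ_cons, List.singleton_append]

-- B's early-exit scan from position j decides the lexicographic comparison of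
-- the remaining window suffix with the remaining suffix of p
theorem pv_windowLe_iff (s pl : List Char) (i : Int) (hi : 0 ≤ i)
    (hlen : i.toNat + pl.length ≤ s.length) :
    ∀ (n j : Nat), pl.length - j = n → j ≤ pl.length →
    (windowLe s pl i j = true ↔
      ((s.drop (i.toNat + j)).take (pl.length - j) ≤ pl.drop j)) := by
  intro n
  induction n with
  | zero =>
    intro j hn hj
    have hj' : j = pl.length := by omega
    rw [windowLe, dif_neg (by omega)]
    subst hj'
    simp only [Nat.sub_self, List.take_zero]
    exact ⟨fun _ => pv_nil_le _, fun _ => by trivial⟩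
  | succ m ih =>
    intro j hn hj
    have hjlt : j < pl.length := by omega
    have hidx : i.toNat + j < s.length := by omega
    have hij : (i + (j : Int)) = ((i.toNat + j : Nat) : Int) := by omega
    rw [windowLe, dif_pos hjlt]
    rw [hij, PySem.List.pyGetD_natCast, List.getD_eq_getElem s default (by omega)]
    have hds : s.drop (i.toNat + j) = s[i.toNat + j] :: s.drop (i.toNat + j + 1) :=
      List.drop_eq_getElem_cons hidx
    have hdp : pl.drop j = pl[j] :: pl.drop (j + 1) :=
      List.drop_eq_getElem_cons hjlt
    have htk : pl.length - j = (pl.length - (j + 1)) + 1 := by omega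
    rw [hds, hdp, htk, List.take_succ_cons]
    by_cases hxy : s[i.toNat + j] = pl[j]
    · rw [if_neg (by simp [hxy]), hxy, pv_cons_le_cons_same]
      have := ih (j + 1) (by omega) (by omega)
      rw [show i.toNat + (j + 1) = i.toNat + j + 1 by omega] at this
      exact this.trans (by rfl)
    · rw [if_pos (by simp [hxy]), pv_cons_le_cons_ne _ _ hxy]
      simp

-- pointwise agreement of the two fold steps on every i of the outer range
theorem pv_step_eq (s pl : List Char) (cnt i : Int)
    (hi : 0 ≤ i) (hlt : i < (s.length : Int) - (pl.length : Int) + 1) :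
    (if ((PySem.List.pyRange i (i + (pl.length : Int)) 1).foldl
          (fun num j => num ++ [PySem.List.pyGetD s j default]) [] ≤ pl)
     then cnt + 1 else cnt)
    = cnt + (if windowLe s pl i 0 then 1 else 0) := by
  have hlen : i.toNat + pl.length ≤ s.length := by omega
  rw [pv_window_eq s pl.length i hi hlen]
  have := pv_windowLe_iff s pl i hi hlen pl.length 0 (by omega) (by omega)
  simp only [Nat.add_zero, Nat.sub_zero, List.drop_zero] at this
  by_cases hw : windowLe s pl i 0 = true
  · rw [if_pos (this.mp hw), hw, if_pos rfl]
  · rw [if_neg (fun hle => hw (this.mpr hle)), if_neg hw]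
    omega

-- ===== VERDICT (by name: the statement is the Claim_ definition above) =====
theorem solution_spec : Claim_equal_solution := by
  intro t p _
  show solution t p = solution_alt t p
  unfold solution solution_alt
  apply PySem.List.foldl_congr_mem
  intro cnt i hmem
  have := (PySem.List.mem_pyRange_one).mp hmem
  exact pv_step_eq t.toList p.toList cnt i this.1 this.2
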